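-- pv_equiv track=rewrite | github.com/software-students-spring2025/5-final-hihi | back_end/select_recipe.py | extract_diet_allergies
-- ===== SOURCE A (Python) =====
-- def extract_diet_allergies(selections):
--     """Convert diet/allergy survey selections to query constraints"""
--     diet_constraints = {}
--
--     # Map selections to database fields
--     diet_mapping = {
--         1: {'vegetarian': True},
--         2: {'vegan': True},
--         3: {'dietary': True},
--         4: {'gluten_free': True},
--         5: {'kosher': True},
--         6: {'lactose': True},
--         7: {'eggs_dairy': False},  # Allergy
--         8: {'seafood': False},     # Allergy
--         9: {'nuts': False}         # Allergy
--     }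
--
--     for selection in selections:
--         if selection == 10:  # No specific requirement
--             return {}
--         diet_constraints.update(diet_mapping.get(selection, {}))
--
--     return diet_constraints
-- ===== SOURCE B (Python) =====
-- def extract_diet_allergies(selections):
--     """Convert diet/allergy survey selections to query constraints"""
--     if 10 in selections:  # 'no specific requirement' anywhere -> no constraints
--         return {}
--     # field names indexed by selection code; codes 1-6 are diets (True), 7-9 allergies (False)
--     keys = ['', 'vegetarian', 'vegan', 'dietary', 'gluten_free',
--             'kosher', 'lactose', 'eggs_dairy', 'seafood', 'nuts']
--     # keep the first occurrence of every selection, then build each entry directly: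
--     # no per-element dict merging, the bool comes from an arithmetic comparison
--     uniq = []
--     seen = set()
--     for s in selections:
--         if s not in seen:
--             seen.add(s)
--             uniq.append(s)
--     return {keys[s]: s < 7 for s in uniq if 1 <= s <= 9}
-- ===== Notes on version B (the rewrite author's own statement) =====
-- stated objective: alternative
-- what changed: B drops A's nested-dict lookup table and in-loop early return entirely: it guards on membership of 10 up front, deduplicates the selections to their first occurrences with a set, and then builds each entry directly from an indexed field-name array with the boolean computed arithmetically (s < 7), so there is no dict merging or key overwriting at all.
import Mathlib
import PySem

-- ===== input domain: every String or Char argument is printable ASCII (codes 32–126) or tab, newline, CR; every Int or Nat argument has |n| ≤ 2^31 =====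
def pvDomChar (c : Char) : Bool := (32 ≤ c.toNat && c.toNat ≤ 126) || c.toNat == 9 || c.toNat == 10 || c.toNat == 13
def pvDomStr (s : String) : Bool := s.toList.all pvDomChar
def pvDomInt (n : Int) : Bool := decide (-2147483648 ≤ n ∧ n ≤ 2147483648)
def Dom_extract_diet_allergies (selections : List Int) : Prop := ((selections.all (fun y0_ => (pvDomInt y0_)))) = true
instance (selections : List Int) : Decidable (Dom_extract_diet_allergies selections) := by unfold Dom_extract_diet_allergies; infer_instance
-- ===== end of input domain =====

-- B replaces A's nested-dict lookup table and in-loop early return by an up-front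
-- membership guard, a set-based first-occurrence dedup pass, and direct entry
-- construction from an indexed field-name array with an arithmetic boolean (objective: alternative).

-- ===== PORT A =====
-- A's diet_mapping: int -> one-entry dict
def pvDietMapping : PySem.Dict Int (PySem.Dict String Bool) :=
  PySem.Dict.ofList
    [ (1, PySem.Dict.ofList [("vegetarian", true)])
    , (2, PySem.Dict.ofList [("vegan", true)])
    , (3, PySem.Dict.ofList [("dietary", true)])
    , (4, PySem.Dict.ofList [("gluten_free", true)])
    , (5, PySem.Dict.ofList [("kosher", true)])
    , (6, PySem.Dict.ofList [("lactose", true)])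
    , (7, PySem.Dict.ofList [("eggs_dairy", false)])
    , (8, PySem.Dict.ofList [("seafood", false)])
    , (9, PySem.Dict.ofList [("nuts", false)]) ]

-- A's for-loop with its early 'return {}' on selection == 10
def pvALoop : List Int → PySem.Dict String Bool → PySem.Dict String Bool
  | [], diet_constraints => diet_constraints
  | selection :: rest, diet_constraints =>
    if selection = 10 then PySem.Dict.empty
    else pvALoop rest
      (diet_constraints.update ((pvDietMapping.getD selection PySem.Dict.empty).items))

def extract_diet_allergies (selections : List Int) : List (String × Bool) :=
  (pvALoop selections PySem.Dict.empty).items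

-- ===== PORT B =====
-- B's field-name array, indexed by the selection code
def pvKeys : List String :=
  ["", "vegetarian", "vegan", "dietary", "gluten_free",
   "kosher", "lactose", "eggs_dairy", "seafood", "nuts"]

def extract_diet_allergies_alt (selections : List Int) : List (String × Bool) :=
  if selections.contains 10 then []
  else
    -- first-occurrence dedup: for s in selections: if s not in seen: seen.add(s); uniq.append(s)
    let uniq :=
      (selections.foldl
        (fun (p : List Int × PySem.Set Int) s =>
          if p.2.contains s then p else (p.1 ++ [s], p.2.add s))
        ([], PySem.Set.empty)).1
    -- {keys[s]: s < 7 for s in uniq if 1 <= s <= 9}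
    (uniq.foldl
      (fun d s =>
        if 1 ≤ s ∧ s ≤ 9 then d.insert (PySem.List.pyGetD pvKeys s "") (decide (s < 7)) else d)
      PySem.Dict.empty).items

-- ===== PRECONDITION & SPEC =====
def Spec_extract_diet_allergies (selections : List Int) (out : List (String × Bool)) : Prop := out = extract_diet_allergies_alt selections
instance (selections : List Int) (out : List (String × Bool)) : Decidable (Spec_extract_diet_allergies selections out) := by unfold Spec_extract_diet_allergies; infer_instance

-- ===== CLAIM (what is proved, stated in full; the proofs are below) =====
def Claim_equal_extract_diet_allergies : Prop := ∀ (selections : List Int), Dom_extract_diet_allergies selections → Spec_extract_diet_allergies selections (extract_diet_allergies selections)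

-- ===== LEMMAS AND PROOFS =====

def pvStep (d : PySem.Dict String Bool) (s : Int) : PySem.Dict String Bool :=
  if 1 ≤ s ∧ s ≤ 9 then d.insert (PySem.List.pyGetD pvKeys s "") (decide (s < 7)) else d

theorem pv_step_eq (s : Int) (d : PySem.Dict String Bool) :
    d.update ((pvDietMapping.getD s PySem.Dict.empty).items) = pvStep d s := by
  have hA : pvDietMapping = PySem.Dict.mk
      [ (1, PySem.Dict.mk [("vegetarian", true)])
      , (2, PySem.Dict.mk [("vegan", true)])
      , (3, PySem.Dict.mk [("dietary", true)])
      , (4, PySem.Dict.mk [("gluten_free", true)])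
      , (5, PySem.Dict.mk [("kosher", true)])
      , (6, PySem.Dict.mk [("lactose", true)])
      , (7, PySem.Dict.mk [("eggs_dairy", false)])
      , (8, PySem.Dict.mk [("seafood", false)])
      , (9, PySem.Dict.mk [("nuts", false)]) ] := by decide
  rw [hA]
  by_cases h : 1 ≤ s ∧ s ≤ 9
  · obtain ⟨h1, h2⟩ := h
    interval_cases s <;>
      simp [pvStep, pvKeys, PySem.Dict.update, PySem.Dict.getD,
        PySem.Dict.get?_mk_cons, PySem.List.pyGetD, PySem.List.pyGet?, PySem.List.pyIdx?,
        PySem.Dict.items]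
  · have hg : (PySem.Dict.mk
      [ (1, PySem.Dict.mk [("vegetarian", true)])
      , (2, PySem.Dict.mk [("vegan", true)])
      , (3, PySem.Dict.mk [("dietary", true)])
      , (4, PySem.Dict.mk [("gluten_free", true)])
      , (5, PySem.Dict.mk [("kosher", true)])
      , (6, PySem.Dict.mk [("lactose", true)])
      , (7, PySem.Dict.mk [("eggs_dairy", false)])
      , (8, PySem.Dict.mk [("seafood", false)])
      , (9, PySem.Dict.mk [("nuts", false)]) ]).get? s = none := by
      simp only [PySem.Dict.get?_mk_cons]
      split_ifs with c1 c2 c3 c4 c5 c6 c7 c8 c9 <;> first | rfl | (exfalso; simp only [beq_iff_eq] at *; omega)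
    simp [pvStep, h, PySem.Dict.getD, hg, PySem.Dict.update, PySem.Dict.empty, PySem.Dict.items]

def pvDedupFrom : List Int → PySem.Set Int → List Int
  | [], _ => []
  | s :: rest, seen =>
    if seen.contains s then pvDedupFrom rest seen
    else s :: pvDedupFrom rest (seen.add s)

theorem pv_loop_eq (l : List Int) (d : PySem.Dict String Bool) :
    pvALoop l d
      = if l.contains 10 then PySem.Dict.empty else l.foldl pvStep d := by
  induction l generalizing d with
  | nil => simp [pvALoop]
  | cons s rest ih =>
    by_cases hs : s = 10
    · simp [pvALoop, hs]
    · simp only [pvALoop, hs, if_false, ih, List.contains_cons, List.foldl_cons, pv_step_eq]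
      have h10 : ¬ ((10 : Int) = s) := fun h => hs h.symm
      simp [h10]

theorem pv_dedup_eq (l : List Int) (u : PySem.Set Int) :
    l.foldl
      (fun (p : List Int × PySem.Set Int) s =>
        if p.2.contains s then p else (p.1 ++ [s], p.2.add s))
      (u, u)
      = (u ++ pvDedupFrom l u, u ++ pvDedupFrom l u) := by
  induction l generalizing u with
  | nil => simp [pvDedupFrom]
  | cons s rest ih =>
    simp only [List.foldl_cons, pvDedupFrom]
    by_cases hc : PySem.Set.contains u s = true
    · rw [if_pos hc, if_pos hc]
      exact ih u
    · rw [if_neg hc, if_neg hc]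
      have hadd : PySem.Set.add u s = u ++ [s] := by
        simp only [PySem.Set.add]
        rw [if_neg hc]
      rw [hadd, ih (u ++ [s])]
      simp

theorem pv_key_inj (s s' : Int) (h : 1 ≤ s ∧ s ≤ 9) (h' : 1 ≤ s' ∧ s' ≤ 9) (hne : s ≠ s') :
    PySem.List.pyGetD pvKeys s "" ≠ PySem.List.pyGetD pvKeys s' "" := by
  obtain ⟨h1, h2⟩ := h
  obtain ⟨h1', h2'⟩ := h'
  interval_cases s <;> interval_cases s' <;> simp_all <;> decide

theorem pv_insert_same (d : PySem.Dict String Bool) (k : String) (v : Bool)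
    (hnd : d.keys.Nodup) (h : d.get? k = some v) : d.insert k v = d := by
  apply PySem.Dict.ext
  have hc : d.contains k = true := by
    rw [PySem.Dict.contains_eq_isSome_get?, h]; rfl
  rw [PySem.Dict.items_insert]
  simp only [hc, if_true]
  have hmem := PySem.Dict.mem_items_of_get?_eq_some (d := d) (k := k) (v := v) h
  have hmap : ∀ p ∈ d.items,
      (fun p : String × Bool => if (p.1 == k) = true then (k, v) else p) p = id p := by
    intro p hp
    by_cases hk : (p.1 == k) = true
    · have hpe : p = (k, v) := by
        have hk' : p.1 = k := by simpa using hk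
        have hg := PySem.Dict.get?_of_mem_items (d := d) (k := p.1) (v := p.2) (by simpa using hp) hnd
        rw [hk', h] at hg
        obtain ⟨a, b⟩ := p
        simp_all
      simp [hk, hpe]
    · simp [hk]
  have := List.map_congr_left hmap
  simpa using this

theorem pv_contains_add (u : PySem.Set Int) (s s' : Int) :
    ((u.add s).contains s' = true) ↔ (u.contains s' = true ∨ s' = s) := by
  simp [PySem.Set.add]
  by_cases hc : s ∈ u
  · simp [hc]
    intro he; rw [he] at *; simp [hc]
  · simp [hc]

theorem pv_fold_dedup (l : List Int) (seen : PySem.Set Int) (d : PySem.Dict String Bool)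
    (hnd : d.keys.Nodup)
    (hinv : ∀ s, 1 ≤ s → s ≤ 9 →
      d.get? (PySem.List.pyGetD pvKeys s "")
        = if seen.contains s then some (decide (s < 7)) else none) :
    l.foldl pvStep d = (pvDedupFrom l seen).foldl pvStep d := by
  induction l generalizing seen d with
  | nil => rfl
  | cons s rest ih =>
    simp only [List.foldl_cons, pvDedupFrom]
    by_cases hc : seen.contains s = true
    · rw [if_pos hc]
      have hstep : pvStep d s = d := by
        unfold pvStep
        by_cases hr : 1 ≤ s ∧ s ≤ 9
        · rw [if_pos hr]
          exact pv_insert_same _ _ _ hnd (by rw [hinv s hr.1 hr.2, if_pos hc])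
        · rw [if_neg hr]
      rw [hstep]
      exact ih seen d hnd hinv
    · rw [if_neg hc]
      simp only [List.foldl_cons]
      have hnd' : (pvStep d s).keys.Nodup := by
        unfold pvStep
        split
        · exact PySem.Dict.nodup_keys_insert _ _ _ hnd
        · exact hnd
      refine ih (seen.add s) (pvStep d s) hnd' ?_
      intro s' h1 h2
      by_cases hr : 1 ≤ s ∧ s ≤ 9
      · have hstep : pvStep d s = d.insert (PySem.List.pyGetD pvKeys s "") (decide (s < 7)) := by
          unfold pvStep; rw [if_pos hr]
        rw [hstep]
        by_cases he : s' = s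
        · subst he
          rw [PySem.Dict.get?_insert_self]
          rw [if_pos ((pv_contains_add seen s' s').mpr (Or.inr rfl))]
        · rw [PySem.Dict.get?_insert_of_ne _ _ (pv_key_inj s' s ⟨h1, h2⟩ hr he)]
          rw [hinv s' h1 h2]
          by_cases hcs : seen.contains s' = true
          · rw [if_pos hcs, if_pos ((pv_contains_add seen s s').mpr (Or.inl hcs))]
          · rw [if_neg hcs, if_neg ?_]
            intro hca
            rcases (pv_contains_add seen s s').mp hca with h | h
            · exact hcs h
            · exact he h
      · have hstep : pvStep d s = d := by unfold pvStep; rw [if_neg hr]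
        rw [hstep, hinv s' h1 h2]
        have hne : s' ≠ s := fun he => hr (he ▸ ⟨h1, h2⟩)
        by_cases hcs : seen.contains s' = true
        · rw [if_pos hcs, if_pos ((pv_contains_add seen s s').mpr (Or.inl hcs))]
        · rw [if_neg hcs, if_neg ?_]
          intro hca
          rcases (pv_contains_add seen s s').mp hca with h | h
          · exact hcs h
          · exact hne h

-- ===== VERDICT (by name: the statement is the Claim_ definition above) =====
theorem extract_diet_allergies_spec : Claim_equal_extract_diet_allergies := by
  intro selections _
  unfold Spec_extract_diet_allergies extract_diet_allergies extract_diet_allergies_alt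
  rw [pv_loop_eq]
  by_cases h : 10 ∈ selections
  · simp [h, PySem.Dict.empty]
  · have hb : selections.contains 10 = false := by simpa using h
    simp only [hb, Bool.false_eq_true, if_false]
    have hd := pv_dedup_eq selections PySem.Set.empty
    have hinit : ((([] : List Int), (PySem.Set.empty : PySem.Set Int)))
        = (((PySem.Set.empty : PySem.Set Int), (PySem.Set.empty : PySem.Set Int))) := rfl
    rw [hinit, hd]
    simp only [PySem.Set.empty, List.nil_append]
    have hfd := pv_fold_dedup selections PySem.Set.empty PySem.Dict.empty
      (PySem.Dict.nodup_keys_empty)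
      (by intro s h1 h2; simp [PySem.Set.empty, PySem.Dict.get?_empty, PySem.Set.contains])
    show (selections.foldl pvStep PySem.Dict.empty).items
        = ((pvDedupFrom selections PySem.Set.empty).foldl pvStep PySem.Dict.empty).items
    rw [hfd]
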